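-- pv_equiv track=rewrite | github.com/0f11/Python | pr08_testing/testting.py | midaiganes
-- ===== SOURCE A (Python) =====
-- def midaiganes(lat, long):
--     """
--     Liiga palju ife.
--
--     :param lat:
--     :param long:
--     :return:
--     """
--     tagasitee = []
--     while True:
--         if lat > 0:
--             lat = lat - 1
--             tagasitee.append("S")
--         elif lat < 0:
--             lat = lat + 1
--             tagasitee.append("N")
--         if long > 0:
--             long = long - 1
--             tagasitee.append("W")
--         elif long < 0:
--             long = long + 1
--             tagasitee.append("E")
--         if lat == 0 and long == 0:
--             break
--     return "".join(tagasitee)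
-- ===== SOURCE B (Python) =====
-- def midaiganes(lat, long):
--     lat_char = "S" if lat > 0 else "N"
--     long_char = "W" if long > 0 else "E"
--     n_lat, n_long = abs(lat), abs(long)
--     m = min(n_lat, n_long)
--     return (lat_char + long_char) * m + lat_char * (n_lat - m) + long_char * (n_long - m)
-- ===== Notes on version B (the rewrite author's own statement) =====
-- stated objective: simpler
-- what changed: Replaced the while-True decrement state machine with a loop-free closed form: the pair block (lat_char+long_char) repeated min(|lat|,|long|) times followed by the leftover axis's character repeated the remaining count, built by string multiplication.
import Mathlib
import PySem

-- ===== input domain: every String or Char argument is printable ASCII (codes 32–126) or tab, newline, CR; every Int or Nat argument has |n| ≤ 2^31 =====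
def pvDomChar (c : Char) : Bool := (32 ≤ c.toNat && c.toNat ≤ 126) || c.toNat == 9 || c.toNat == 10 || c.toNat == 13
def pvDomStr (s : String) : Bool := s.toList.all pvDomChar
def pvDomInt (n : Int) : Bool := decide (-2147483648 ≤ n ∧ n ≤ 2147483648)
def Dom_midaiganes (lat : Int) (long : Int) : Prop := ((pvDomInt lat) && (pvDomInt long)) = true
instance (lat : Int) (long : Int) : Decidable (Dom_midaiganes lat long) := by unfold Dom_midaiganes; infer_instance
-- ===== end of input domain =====

-- B replaces A's while-True decrement state machine by a loop-free closed form: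
-- the pair block repeated min(|lat|,|long|) times plus the leftover axis's character
-- repeated the remaining count (objective: simpler).


-- ===== PORT A =====
-- A's while-True loop; the Nat fuel argument is only a structural-totality guard
-- (fuel ≥ |lat|+|long|+1 always suffices, and midaiganes supplies it), not part of A's logic.
def midaiganesLoop (fuel : Nat) (lat : Int) (long : Int) (acc : List String) : List String :=
  match fuel with
  | 0 => acc
  | fuel + 1 =>
    let lat' : Int := if lat > 0 then lat - 1 else if lat < 0 then lat + 1 else lat
    let acc1 : List String := if lat > 0 then acc ++ ["S"] else if lat < 0 then acc ++ ["N"] else acc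
    let long' : Int := if long > 0 then long - 1 else if long < 0 then long + 1 else long
    let acc2 : List String := if long > 0 then acc1 ++ ["W"] else if long < 0 then acc1 ++ ["E"] else acc1
    if lat' = 0 ∧ long' = 0 then acc2
    else midaiganesLoop fuel lat' long' acc2

def midaiganes (lat : Int) (long : Int) : String :=
  String.join (midaiganesLoop (lat.natAbs + long.natAbs + 1) lat long [])

-- ===== PORT B =====
-- Python's  s * n  for a nonnegative count
def strTimes (s : String) (n : Nat) : String := String.join (List.replicate n s)

def midaiganes_alt (lat : Int) (long : Int) : String :=
  let latChar : String := if lat > 0 then "S" else "N"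
  let longChar : String := if long > 0 then "W" else "E"
  let nLat : Nat := lat.natAbs
  let nLong : Nat := long.natAbs
  let m : Nat := min nLat nLong
  strTimes (latChar ++ longChar) m ++ strTimes latChar (nLat - m) ++ strTimes longChar (nLong - m)

-- ===== PRECONDITION & SPEC =====
def Spec_midaiganes (lat : Int) (long : Int) (out : String) : Prop := out = midaiganes_alt lat long
instance (lat : Int) (long : Int) (out : String) : Decidable (Spec_midaiganes lat long out) := by unfold Spec_midaiganes; infer_instance

-- ===== CLAIM (what is proved, stated in full; the proofs are below) =====
def Claim_equal_midaiganes : Prop := ∀ (lat : Int) (long : Int), Dom_midaiganes lat long → Spec_midaiganes lat long (midaiganes lat long)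

-- ===== LEMMAS AND PROOFS =====

-- the interleaving A's loop produces, as a list of direction strings
def interN (c1 c2 : String) (a b : Nat) : List String :=
  if a = 0 ∧ b = 0 then [] else
    (if 0 < a then [c1] else []) ++ (if 0 < b then [c2] else []) ++ interN c1 c2 (a - 1) (b - 1)
termination_by a + b
decreasing_by omega

lemma interN_zero_zero (c1 c2 : String) : interN c1 c2 0 0 = [] := by
  rw [interN]; simp

lemma interN_zero_left (c c2 : String) (b : Nat) : interN c c2 0 b = List.replicate b c2 := by
  induction b with
  | zero => rw [interN]; simp
  | succ m ih => rw [interN]; simp [ih, List.replicate_succ]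

lemma interN_zero_right (c1 c : String) (a : Nat) : interN c1 c a 0 = List.replicate a c1 := by
  induction a with
  | zero => rw [interN]; simp
  | succ m ih => rw [interN]; simp [ih, List.replicate_succ]

lemma interN_congr (c1 c1' c2 c2' : String) (a b : Nat)
    (h1 : 0 < a → c1 = c1') (h2 : 0 < b → c2 = c2') :
    interN c1 c2 a b = interN c1' c2' a b := by
  rcases Nat.eq_zero_or_pos a with ha | ha <;> rcases Nat.eq_zero_or_pos b with hb | hb
  · subst ha; subst hb; rw [interN_zero_zero, interN_zero_zero]
  · subst ha; rw [interN_zero_left, interN_zero_left, h2 hb]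
  · subst hb; rw [interN_zero_right, interN_zero_right, h1 ha]
  · rw [h1 ha, h2 hb]

lemma interN_step (lat long : Int) (h : ¬(lat = 0 ∧ long = 0)) :
    interN (if lat > 0 then "S" else "N") (if long > 0 then "W" else "E") lat.natAbs long.natAbs
      = ((if lat > 0 then ["S"] else if lat < 0 then ["N"] else [])
        ++ (if long > 0 then ["W"] else if long < 0 then ["E"] else []))
        ++ interN (if (if lat > 0 then lat - 1 else if lat < 0 then lat + 1 else lat) > 0 then "S" else "N")
                  (if (if long > 0 then long - 1 else if long < 0 then long + 1 else long) > 0 then "W" else "E")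
                  (if lat > 0 then lat - 1 else if lat < 0 then lat + 1 else lat).natAbs
                  (if long > 0 then long - 1 else if long < 0 then long + 1 else long).natAbs := by
  conv_lhs => rw [interN]
  have hne : ¬(lat.natAbs = 0 ∧ long.natAbs = 0) := by omega
  rw [if_neg hne]
  have e1 : (if lat > 0 then lat - 1 else if lat < 0 then lat + 1 else lat).natAbs = lat.natAbs - 1 := by
    split_ifs <;> omega
  have e2 : (if long > 0 then long - 1 else if long < 0 then long + 1 else long).natAbs = long.natAbs - 1 := by
    split_ifs <;> omega
  rw [e1, e2]
  congr 1
  · congr 1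
    · by_cases hpos : lat > 0
      · simp [hpos, show 0 < lat.natAbs from by omega]
      · by_cases hneg : lat < 0
        · simp [hpos, hneg, show 0 < lat.natAbs from by omega]
        · simp [hpos, hneg, show ¬ 0 < lat.natAbs from by omega]
    · by_cases hpos : long > 0
      · simp [hpos, show 0 < long.natAbs from by omega]
      · by_cases hneg : long < 0
        · simp [hpos, hneg, show 0 < long.natAbs from by omega]
        · simp [hpos, hneg, show ¬ 0 < long.natAbs from by omega]
  · refine interN_congr _ _ _ _ _ _ (fun hp => ?_) (fun hp => ?_)
    · by_cases hpos : lat > 0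
      · simp [hpos]; omega
      · by_cases hneg : lat < 0
        · simp [hpos, hneg, show ¬ (lat + 1 > 0) from by omega]
        · exfalso; omega
    · by_cases hpos : long > 0
      · simp [hpos]; omega
      · by_cases hneg : long < 0
        · simp [hpos, hneg, show ¬ (long + 1 > 0) from by omega]
        · exfalso; omega

lemma loop_eq : ∀ (fuel : Nat) (lat long : Int) (acc : List String),
    lat.natAbs + long.natAbs < fuel →
    midaiganesLoop fuel lat long acc
      = acc ++ interN (if lat > 0 then "S" else "N") (if long > 0 then "W" else "E")
          lat.natAbs long.natAbs := by
  intro fuel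
  induction fuel with
  | zero => intro lat long acc h; omega
  | succ m ih =>
    intro lat long acc hfuel
    by_cases h0 : lat = 0 ∧ long = 0
    · obtain ⟨h1, h2⟩ := h0; subst h1; subst h2
      rw [midaiganesLoop]
      simp [interN_zero_zero]
    · rw [midaiganesLoop, interN_step lat long h0]
      by_cases hb : (if lat > 0 then lat - 1 else if lat < 0 then lat + 1 else lat) = 0
          ∧ (if long > 0 then long - 1 else if long < 0 then long + 1 else long) = 0
      · rw [if_pos hb,
            show (if lat > 0 then lat - 1 else if lat < 0 then lat + 1 else lat).natAbs = 0 from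
              Int.natAbs_eq_zero.mpr hb.1,
            show (if long > 0 then long - 1 else if long < 0 then long + 1 else long).natAbs = 0 from
              Int.natAbs_eq_zero.mpr hb.2,
            interN_zero_zero]
        split_ifs <;> simp
      · have hm : (if lat > 0 then lat - 1 else if lat < 0 then lat + 1 else lat).natAbs
            + (if long > 0 then long - 1 else if long < 0 then long + 1 else long).natAbs < m := by
          split_ifs at * <;> omega
        rw [if_neg hb, ih _ _ _ hm]
        split_ifs <;> simp

lemma foldl_append (l : List String) : ∀ s : String, l.foldl (· ++ ·) s = s ++ l.foldl (· ++ ·) "" := by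
  induction l with
  | nil => simp
  | cons h t ih =>
    intro s
    simp only [List.foldl_cons]
    rw [ih (s ++ h), ih ("" ++ h)]
    simp [String.append_assoc]

lemma strTimes_succ (s : String) (n : Nat) : strTimes s (n + 1) = s ++ strTimes s n := by
  simp only [strTimes, List.replicate_succ, String.join, List.foldl_cons]
  rw [foldl_append]
  simp

lemma join_interN (c1 c2 : String) : ∀ (n a b : Nat), a + b = n →
    String.join (interN c1 c2 a b)
      = strTimes (c1 ++ c2) (min a b) ++ strTimes c1 (a - min a b) ++ strTimes c2 (b - min a b) := by
  intro n
  induction n using Nat.strong_induction_on with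
  | _ n ih =>
    intro a b hn
    rcases Nat.eq_zero_or_pos a with ha | ha
    · subst ha
      rw [interN_zero_left]
      simp [strTimes, String.join]
    · rcases Nat.eq_zero_or_pos b with hb | hb
      · subst hb
        rw [interN_zero_right]
        simp [strTimes, String.join]
      · rw [interN, if_neg (by omega), if_pos ha, if_pos hb]
        have hrec := ih (a - 1 + (b - 1)) (by omega) (a - 1) (b - 1) rfl
        simp only [List.cons_append, List.nil_append, String.join]
        rw [show List.foldl (· ++ ·) "" (c1 :: c2 :: interN c1 c2 (a-1) (b-1))
              = c1 ++ c2 ++ String.join (interN c1 c2 (a-1) (b-1)) from ?_, hrec]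
        · rw [show min a b = min (a-1) (b-1) + 1 from by omega, strTimes_succ,
              show a - (min (a-1) (b-1) + 1) = a - 1 - min (a-1) (b-1) from by omega,
              show b - (min (a-1) (b-1) + 1) = b - 1 - min (a-1) (b-1) from by omega]
          simp [String.append_assoc]
        · simp only [String.join, List.foldl_cons]
          rw [foldl_append]
          simp [String.append_assoc]

-- ===== VERDICT (by name: the statement is the Claim_ definition above) =====
theorem midaiganes_spec : Claim_equal_midaiganes := by
  intro lat long _
  unfold Spec_midaiganes midaiganes
  rw [loop_eq (lat.natAbs + long.natAbs + 1) lat long [] (by omega), List.nil_append,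
      join_interN _ _ (lat.natAbs + long.natAbs) lat.natAbs long.natAbs rfl]
  rfl
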